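-- pv_equiv track=rewrite | github.com/ssrskl/gym-flp-fbs | FbsEnv/utils/FBSUtil.py | fill_without_duplicates
-- ===== SOURCE A (Python) =====
-- def fill_without_duplicates(parent1: list[int], parent2: list[int],
--                             startPoint: int,
--                             endPoint: int) -> tuple[list[int], list[int]]:
--     crossover_part_1 = parent1[startPoint:endPoint + 1]
--     crossover_part_2 = parent2[startPoint:endPoint + 1]
--     # 获取 parent1 中去除 crossover_part_2 的部分
--     parent1_remaining = [
--         elem for elem in parent1 if elem not in crossover_part_2
--     ]
--     # 获取 parent2 中去除 crossover_part_1 的部分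
--     parent2_remaining = [
--         elem for elem in parent2 if elem not in crossover_part_1
--     ]
--
--     offspring_1 = parent1_remaining[:
--                                     startPoint] + crossover_part_2 + parent1_remaining[
--                                         startPoint:]
--     offspring_2 = parent2_remaining[:
--                                     startPoint] + crossover_part_1 + parent2_remaining[
--                                         startPoint:]
--
--     return offspring_1, offspring_2
-- ===== SOURCE B (Python) =====
-- def fill_without_duplicates(parent1, parent2, startPoint, endPoint):
--     def splice(src, donor):
--         # stream src once: skip elements that occur in the donor's crossover
--         # window, and emit the window in-line when the count of kept elements
--         # reaches the cut point (or at the end if it never does).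
--         block = donor[startPoint:endPoint + 1]
--         window = set(block)
--         out = []
--         kept = 0
--         for x in src:
--             if x in window:
--                 continue
--             if kept == startPoint:
--                 out.extend(block)
--             out.append(x)
--             kept += 1
--         if kept <= startPoint:
--             out.extend(block)
--         return out
--
--     return splice(parent1, parent2), splice(parent2, parent1)
-- ===== Notes on version B (the rewrite author's own statement) =====
-- stated objective: alternative
-- what changed: Each offspring is built in one fused pass over the source parent with a kept-element counter that emits the crossover window in-line at the cut point, instead of A's three staged lists (filter, two slices, concatenation); Pre_ excludes negative startPoint, where A's slices apply Python's negative-index wraparound, which is meaningless for a crossover cut point.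
-- outside the precondition, e.g. on fill_without_duplicates([1, 2, 3], [3, 2, 1], -2, 2): A returns ([2, 1, 3], [2, 3, 1]), B returns ([3], [1])
import Mathlib
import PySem

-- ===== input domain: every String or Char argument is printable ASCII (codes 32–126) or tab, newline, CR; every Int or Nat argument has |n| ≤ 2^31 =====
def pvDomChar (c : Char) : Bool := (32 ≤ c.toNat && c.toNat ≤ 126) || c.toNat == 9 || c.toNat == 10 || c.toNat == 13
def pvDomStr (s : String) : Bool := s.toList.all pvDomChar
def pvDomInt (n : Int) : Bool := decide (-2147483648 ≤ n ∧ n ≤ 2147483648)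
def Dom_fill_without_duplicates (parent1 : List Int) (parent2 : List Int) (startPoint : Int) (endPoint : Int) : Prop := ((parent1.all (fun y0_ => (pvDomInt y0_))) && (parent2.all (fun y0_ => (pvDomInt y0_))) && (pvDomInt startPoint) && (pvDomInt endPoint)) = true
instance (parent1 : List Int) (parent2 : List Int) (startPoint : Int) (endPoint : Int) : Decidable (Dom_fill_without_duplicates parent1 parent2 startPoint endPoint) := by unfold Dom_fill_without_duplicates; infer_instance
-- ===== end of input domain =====

-- B builds each offspring in one fused counter-driven pass instead of A's staged
-- filter / slice / concatenate; objective: alternative decomposition, not speed.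

-- ===== PORT A =====
def fill_without_duplicates (parent1 : List Int) (parent2 : List Int) (startPoint : Int) (endPoint : Int) : List Int × List Int :=
  let crossover_part_1 := PySem.List.slice parent1 (some startPoint) (some (endPoint + 1))
  let crossover_part_2 := PySem.List.slice parent2 (some startPoint) (some (endPoint + 1))
  let parent1_remaining := parent1.filter (fun elem => !(crossover_part_2.contains elem))
  let parent2_remaining := parent2.filter (fun elem => !(crossover_part_1.contains elem))
  let offspring_1 := PySem.List.slice parent1_remaining none (some startPoint)
      ++ crossover_part_2 ++ PySem.List.slice parent1_remaining (some startPoint) none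
  let offspring_2 := PySem.List.slice parent2_remaining none (some startPoint)
      ++ crossover_part_1 ++ PySem.List.slice parent2_remaining (some startPoint) none
  (offspring_1, offspring_2)

-- ===== PORT B =====
-- helper `splice` of Source B: one pass over src, counter `kept`, window emitted in-line
def pvSpliceAlt (src : List Int) (donor : List Int) (startPoint : Int) (endPoint : Int) : List Int :=
  let block := PySem.List.slice donor (some startPoint) (some (endPoint + 1))
  let window : PySem.Set Int := PySem.Set.ofList block
  let st := src.foldl
    (fun (st : List Int × Nat) x =>
      if window.contains x then st
      else ((if (st.2 : Int) = startPoint then st.1 ++ block else st.1) ++ [x], st.2 + 1))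
    ([], 0)
  if (st.2 : Int) ≤ startPoint then st.1 ++ block else st.1

def fill_without_duplicates_alt (parent1 : List Int) (parent2 : List Int) (startPoint : Int) (endPoint : Int) : List Int × List Int :=
  (pvSpliceAlt parent1 parent2 startPoint endPoint,
   pvSpliceAlt parent2 parent1 startPoint endPoint)

-- ===== PRECONDITION & SPEC =====
-- Pre_ restricts to the function's natural domain: a non-negative cut point. For
-- negative startPoint A still returns a value, but only via Python's negative-index
-- wraparound in its slices — meaningless for a crossover cut — so it is excluded.
def Pre_fill_without_duplicates (parent1 : List Int) (parent2 : List Int) (startPoint : Int) (endPoint : Int) : Prop := 0 ≤ startPoint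
instance (parent1 : List Int) (parent2 : List Int) (startPoint : Int) (endPoint : Int) : Decidable (Pre_fill_without_duplicates parent1 parent2 startPoint endPoint) := by unfold Pre_fill_without_duplicates; infer_instance

def pvWitness_fill_without_duplicates : List Int × List Int × Int × Int := ([1, 2, 3], [3, 2, 1], 1, 2)

def Spec_fill_without_duplicates (parent1 : List Int) (parent2 : List Int) (startPoint : Int) (endPoint : Int) (out : List Int × List Int) : Prop := out = fill_without_duplicates_alt parent1 parent2 startPoint endPoint
instance (parent1 : List Int) (parent2 : List Int) (startPoint : Int) (endPoint : Int) (out : List Int × List Int) : Decidable (Spec_fill_without_duplicates parent1 parent2 startPoint endPoint out) := by unfold Spec_fill_without_duplicates; infer_instance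

-- ===== CLAIM (what is proved, stated in full; the proofs are below) =====
def Claim_equal_fill_without_duplicates : Prop := ∀ (parent1 : List Int) (parent2 : List Int) (startPoint : Int) (endPoint : Int), Dom_fill_without_duplicates parent1 parent2 startPoint endPoint → Pre_fill_without_duplicates parent1 parent2 startPoint endPoint → Spec_fill_without_duplicates parent1 parent2 startPoint endPoint (fill_without_duplicates parent1 parent2 startPoint endPoint)

-- ===== LEMMAS AND PROOFS =====

-- skipping window elements while folding = folding over the filtered list
theorem pv_foldl_skip (p : Int → Bool) (g : List Int × Nat → Int → List Int × Nat) :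
    ∀ (l : List Int) (init : List Int × Nat),
      l.foldl (fun st x => if p x then st else g st x) init
      = (l.filter (fun x => !p x)).foldl g init := by
  intro l
  induction l with
  | nil => intro init; rfl
  | cons x xs ih =>
      intro init
      by_cases hx : p x = true
      · simp [List.filter_cons, hx, ih]
      · simp [List.filter_cons, Bool.not_eq_true] at hx ⊢
        simp [hx, ih]

-- once the counter has passed i the fold only appends the elements
theorem pv_fold_past (block : List Int) (i : Nat) :
    ∀ (l : List Int) (k : Nat) (acc : List Int), i < k →
      l.foldl (fun (st : List Int × Nat) x =>
          ((if (st.2 : Int) = (i : Int) then st.1 ++ block else st.1) ++ [x], st.2 + 1)) (acc, k)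
      = (acc ++ l, k + l.length) := by
  intro l
  induction l with
  | nil => intro k acc _; simp
  | cons x xs ih =>
      intro k acc hk
      simp only [List.foldl]
      rw [if_neg (by exact_mod_cast (by omega : ¬ (k : Int) = (i : Int)))]
      rw [ih (k + 1) (acc ++ [x]) (by omega)]
      simp; omega

-- the counter-driven fold started at k ≤ i splices the block at position i - k
theorem pv_fold_eq (block : List Int) (i : Nat) :
    ∀ (l : List Int) (k : Nat) (acc : List Int), k ≤ i →
      l.foldl (fun (st : List Int × Nat) x =>
          ((if (st.2 : Int) = (i : Int) then st.1 ++ block else st.1) ++ [x], st.2 + 1)) (acc, k)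
      = (acc ++ l.take (i - k) ++ (if i - k < l.length then block else []) ++ l.drop (i - k),
         k + l.length) := by
  intro l
  induction l with
  | nil => intro k acc _; simp
  | cons x xs ih =>
      intro k acc hk
      simp only [List.foldl]
      by_cases hki : k = i
      · subst hki
        rw [if_pos rfl, pv_fold_past block k xs (k + 1) _ (by omega)]
        simp; omega
      · rw [if_neg (by exact_mod_cast (by omega : ¬ (k : Int) = (i : Int)))]
        rw [ih (k + 1) (acc ++ [x]) (by omega)]
        have h1 : i - k = (i - (k + 1)) + 1 := by omega
        rw [h1]
        simp [List.take_succ_cons, List.drop_succ_cons]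
        omega

-- for a non-negative start, clampIdx is the min with the length
theorem pv_clampIdx_nonneg (n : Nat) (s : Int) (hs : 0 ≤ s) :
    PySem.List.clampIdx n s = min s.toNat n := by
  unfold PySem.List.clampIdx
  split_ifs <;> omega

-- one offspring: A's filter-slice-concat equals B's fused pass
theorem pv_splice_eq (src donor : List Int) (s e : Int) (hs : 0 ≤ s) :
    PySem.List.slice (src.filter (fun elem => !((PySem.List.slice donor (some s) (some (e + 1))).contains elem))) none (some s)
      ++ PySem.List.slice donor (some s) (some (e + 1))
      ++ PySem.List.slice (src.filter (fun elem => !((PySem.List.slice donor (some s) (some (e + 1))).contains elem))) (some s) none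
    = pvSpliceAlt src donor s e := by
  simp only [pvSpliceAlt]
  set block := PySem.List.slice donor (some s) (some (e + 1)) with hblock
  have hc : ∀ x : Int, (PySem.Set.ofList block).contains x = block.contains x := by
    intro x
    rw [Bool.eq_iff_iff]
    simp [PySem.Set.mem_ofList]
  set i := s.toNat with hi
  have hsi : s = (i : Int) := by omega
  rw [hsi]
  -- the skip-fold is the fold over A's filtered list
  rw [show (fun (st : List Int × Nat) x =>
        if (PySem.Set.ofList block).contains x then st
        else ((if (st.2 : Int) = ((i : Nat) : Int) then st.1 ++ block else st.1) ++ [x], st.2 + 1))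
      = (fun (st : List Int × Nat) x =>
        if block.contains x then st
        else ((if (st.2 : Int) = ((i : Nat) : Int) then st.1 ++ block else st.1) ++ [x], st.2 + 1))
    from funext fun st => funext fun x => by rw [hc x]]
  rw [pv_foldl_skip (fun x => block.contains x)
      (fun (st : List Int × Nat) x =>
        ((if (st.2 : Int) = ((i : Nat) : Int) then st.1 ++ block else st.1) ++ [x], st.2 + 1)) src ([], 0)]
  set rem := src.filter (fun elem => !(block.contains elem)) with hrem
  rw [pv_fold_eq block i rem 0 [] (Nat.zero_le i)]
  -- A's slices are take/drop at the clamped index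
  have hslice1 : PySem.List.slice rem none (some ((i : Nat) : Int)) = rem.take (PySem.List.clampIdx rem.length ((i : Nat) : Int)) := by
    simp [PySem.List.slice]
  rw [hslice1, PySem.List.slice_some_none rem ((i : Nat) : Int)]
  rw [pv_clampIdx_nonneg rem.length ((i : Nat) : Int) (by positivity)]
  simp only [Int.toNat_natCast, Nat.sub_zero, Nat.zero_add, List.nil_append]
  by_cases hlt : i < rem.length
  · rw [if_pos hlt, if_neg (by exact_mod_cast Nat.not_le.mpr hlt)]
    rw [min_eq_left (by omega)]
  · rw [if_neg hlt, if_pos (by exact_mod_cast (by omega : rem.length ≤ i))]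
    rw [min_eq_right (by omega)]
    simp [List.drop_length]

-- ===== VERDICT (by name: the statement is the Claim_ definition above) =====
theorem fill_without_duplicates_spec : Claim_equal_fill_without_duplicates := by
  intro parent1 parent2 startPoint endPoint _ hpre
  unfold Spec_fill_without_duplicates
  show fill_without_duplicates parent1 parent2 startPoint endPoint = _
  simp only [fill_without_duplicates, fill_without_duplicates_alt]
  exact Prod.ext (pv_splice_eq parent1 parent2 startPoint endPoint hpre)
    (pv_splice_eq parent2 parent1 startPoint endPoint hpre)
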